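-- pv_equiv track=rewrite | github.com/j-schmied/algorithms | turtoise_hare.py | turtoise_and_hare
-- ===== SOURCE A (Python) =====
-- def turtoise_and_hare(number_list: list):
--     turtoise = number_list[0]
--     hare = number_list[0]
--
--     while True:
--         turtoise = number_list[turtoise]
--         hare = number_list[number_list[hare]]
--
--         if turtoise == hare:
--             break
--
--     ptr1 = number_list[0]
--     ptr2 = turtoise
--
--     while ptr1 != ptr2:
--         ptr1 = number_list[ptr1]
--         ptr2 = number_list[ptr2]
--
--     return ptr1
-- ===== SOURCE B (Python) =====
-- def turtoise_and_hare(number_list: list):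
--     seen = set()
--     current = number_list[0]
--     while current not in seen:
--         seen.add(current)
--         current = number_list[current]
--     return current
-- ===== Notes on version B (the rewrite author's own statement) =====
-- stated objective: simpler
-- what changed: Replaces Floyd's two-phase tortoise/hare pointer chase (meet-in-cycle, then reconverge from the head) with a single walk from the list's head value that records visited values in a set and returns the first repeated one, which is the cycle entrance.
import Mathlib
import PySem

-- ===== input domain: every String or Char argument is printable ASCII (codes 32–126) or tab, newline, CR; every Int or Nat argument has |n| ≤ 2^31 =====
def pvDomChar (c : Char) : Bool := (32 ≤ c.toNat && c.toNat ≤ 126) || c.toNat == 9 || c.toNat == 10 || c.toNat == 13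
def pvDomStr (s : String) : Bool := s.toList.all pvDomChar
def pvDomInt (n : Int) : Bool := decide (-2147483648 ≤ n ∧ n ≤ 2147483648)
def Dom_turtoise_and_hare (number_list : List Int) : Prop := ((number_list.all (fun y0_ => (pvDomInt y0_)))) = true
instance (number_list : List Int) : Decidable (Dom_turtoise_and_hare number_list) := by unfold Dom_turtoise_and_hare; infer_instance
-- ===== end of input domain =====

-- B replaces Floyd's tortoise/hare two-phase pointer scheme by a single walk from the head value that keeps a set of
-- visited values and returns the first repeated one (objective: simpler; same O(cycle) cost).

-- ===== PORT A =====
-- while True: turtoise = l[turtoise]; hare = l[l[hare]]; if turtoise == hare: break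
-- (fuel only makes the unbounded 'while True' total; under Pre_ the meeting happens before fuel runs out)
def thPhase1 (l : List Int) : Nat → Int → Int → Option Int
  | 0, _, _ => none
  | fuel+1, t, h =>
    match PySem.List.pyGet? l t with
    | none => none
    | some t' =>
      match PySem.List.pyGet? l h with
      | none => none
      | some h1 =>
        match PySem.List.pyGet? l h1 with
        | none => none
        | some h' => if t' = h' then some t' else thPhase1 l fuel t' h'

-- while ptr1 != ptr2: ptr1 = l[ptr1]; ptr2 = l[ptr2]
def thPhase2 (l : List Int) : Nat → Int → Int → Option Int
  | 0, _, _ => none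
  | fuel+1, p1, p2 =>
    if p1 = p2 then some p1
    else
      match PySem.List.pyGet? l p1 with
      | none => none
      | some q1 =>
        match PySem.List.pyGet? l p2 with
        | none => none
        | some q2 => thPhase2 l fuel q1 q2

def turtoise_and_hare (number_list : List Int) : Int :=
  match PySem.List.pyGet? number_list 0 with
  | none => 0
  | some s =>
    match thPhase1 number_list (number_list.length + 1) s s with
    | none => 0
    | some t =>
      match thPhase2 number_list (number_list.length + 1) s t with
      | none => 0
      | some r => r

-- ===== PORT B =====
-- while current not in seen: seen.add(current); current = l[current]
def thWalk (l : List Int) : Nat → PySem.Set Int → Int → Option Int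
  | 0, _, _ => none
  | fuel+1, seen, cur =>
    if PySem.Set.contains seen cur then some cur
    else
      match PySem.List.pyGet? l cur with
      | none => none
      | some nxt => thWalk l fuel (PySem.Set.add seen cur) nxt

def turtoise_and_hare_alt (number_list : List Int) : Int :=
  match PySem.List.pyGet? number_list 0 with
  | none => 0
  | some c =>
    match thWalk number_list (number_list.length + 1) PySem.Set.empty c with
    | none => 0
    | some r => r

-- ===== PRECONDITION & SPEC =====
-- thOb l k : the k-th value of the walk that starts at index 0 and repeatedly indexes by the current value, none once an index was out of range
def thOb (l : List Int) : Nat → Option Int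
  | 0 => PySem.List.pyGet? l 0
  | k+1 => (thOb l k).bind (PySem.List.pyGet? l)

-- Pre_: the walk from the head element never leaves the index range within the first len+1 steps (after that many
-- in-range steps a value must repeat, so the whole walk stays in range). These are exactly the inputs on
-- which A returns rather than raising IndexError; unreachable out-of-range values are allowed.
def Pre_turtoise_and_hare (number_list : List Int) : Prop :=
  ∀ k, k ≤ number_list.length → thOb number_list k ≠ none
instance (number_list : List Int) : Decidable (Pre_turtoise_and_hare number_list) := by
  unfold Pre_turtoise_and_hare; infer_instance

def pvWitness_turtoise_and_hare : List Int := [1, 2, 0]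

def Spec_turtoise_and_hare (number_list : List Int) (out : Int) : Prop := out = turtoise_and_hare_alt number_list
instance (number_list : List Int) (out : Int) : Decidable (Spec_turtoise_and_hare number_list out) := by unfold Spec_turtoise_and_hare; infer_instance

-- ===== CLAIM (what is proved, stated in full; the proofs are below) =====
def Claim_equal_turtoise_and_hare : Prop := ∀ (number_list : List Int), Dom_turtoise_and_hare number_list → Pre_turtoise_and_hare number_list → Spec_turtoise_and_hare number_list (turtoise_and_hare number_list)

-- ===== LEMMAS AND PROOFS =====

-- the walk is determined by its current value: equal steps propagate
theorem thOb_shift (l : List Int) {i j : Nat} (h : thOb l i = thOb l j) :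
    ∀ t, thOb l (i + t) = thOb l (j + t) := by
  intro t
  induction t with
  | zero => simpa using h
  | succ t ih => show (thOb l (i + t)).bind _ = (thOb l (j + t)).bind _; rw [ih]

-- under Pre_, some two of the first len+1 steps carry the same value (pigeonhole into the list's elements)
theorem thOb_repeat (l : List Int) (hPre : Pre_turtoise_and_hare l) :
    ∃ i j, i < j ∧ j ≤ l.length ∧ thOb l i = thOb l j := by
  have hval : ∀ k ∈ Finset.range (l.length + 1), (thOb l k).getD 0 ∈ l := by
    intro k hk
    simp only [Finset.mem_range] at hk
    have hne := hPre k (by omega)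
    obtain ⟨v, hv⟩ := Option.ne_none_iff_exists'.mp hne
    rw [hv]; simp only [Option.getD_some]
    cases k with
    | zero => exact PySem.List.mem_of_pyGet?_eq_some l hv
    | succ k =>
      have hne' := hPre k (by omega)
      obtain ⟨w, hw⟩ := Option.ne_none_iff_exists'.mp hne'
      have : PySem.List.pyGet? l w = some v := by
        have := hv; rw [show thOb l (k+1) = (thOb l k).bind (PySem.List.pyGet? l) from rfl, hw] at this
        simpa using this
      exact PySem.List.mem_of_pyGet?_eq_some l this
  have hcard : l.toFinset.card < (Finset.range (l.length + 1)).card := by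
    have := List.toFinset_card_le l
    simp only [Finset.card_range]; omega
  have hmaps : Set.MapsTo (fun k => (thOb l k).getD 0) ↑(Finset.range (l.length + 1)) ↑l.toFinset := by
    intro a ha
    simp only [List.coe_toFinset, Set.mem_setOf_eq]
    exact hval a ha
  obtain ⟨a, ha, b, hb, hne, heq⟩ := Finset.exists_ne_map_eq_of_card_lt_of_maps_to hcard hmaps
  simp only [Finset.mem_range] at ha hb
  have hsome : thOb l a = thOb l b := by
    obtain ⟨va, hva⟩ := Option.ne_none_iff_exists'.mp (hPre a (by omega))
    obtain ⟨vb, hvb⟩ := Option.ne_none_iff_exists'.mp (hPre b (by omega))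
    rw [hva, hvb] at heq ⊢
    simp only [Option.getD_some] at heq
    rw [heq]
  rcases lt_or_gt_of_ne hne with h | h
  · exact ⟨a, b, h, by omega, hsome⟩
  · exact ⟨b, a, h, by omega, hsome.symm⟩

-- hence the whole walk is defined
theorem thOb_ne_none (l : List Int) (hPre : Pre_turtoise_and_hare l) : ∀ k, thOb l k ≠ none := by
  obtain ⟨i, j, hij, hjn, heq⟩ := thOb_repeat l hPre
  intro k
  induction k using Nat.strong_induction_on with
  | _ k ih =>
    by_cases hk : k ≤ l.length
    · exact hPre k hk
    · have hkj : j ≤ k := by omega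
      have : thOb l k = thOb l (k - (j - i)) := by
        have := thOb_shift l heq.symm (k - j)
        have h1 : j + (k - j) = k := by omega
        have h2 : i + (k - j) = k - (j - i) := by omega
        rw [h1, h2] at this; exact this
      rw [this]
      exact ih _ (by omega)

-- the total value sequence both programs walk along
def thX (l : List Int) (k : Nat) : Int := (thOb l k).getD 0

theorem thOb_eq_some (l : List Int) (hPre : Pre_turtoise_and_hare l) (k : Nat) :
    thOb l k = some (thX l k) := by
  obtain ⟨v, hv⟩ := Option.ne_none_iff_exists'.mp (thOb_ne_none l hPre k)
  rw [hv]; simp [thX, hv]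

theorem thX_step (l : List Int) (hPre : Pre_turtoise_and_hare l) (k : Nat) :
    PySem.List.pyGet? l (thX l k) = some (thX l (k+1)) := by
  have h1 := thOb_eq_some l hPre k
  have h2 := thOb_eq_some l hPre (k+1)
  rw [show thOb l (k+1) = (thOb l k).bind (PySem.List.pyGet? l) from rfl, h1] at h2
  simpa using h2

theorem th_pigeonhole (l : List Int) (hPre : Pre_turtoise_and_hare l) :
    ∃ j, j ≤ l.length ∧ ∃ i, i < j ∧ thX l i = thX l j := by
  obtain ⟨i, j, hij, hjn, heq⟩ := thOb_repeat l hPre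
  refine ⟨j, hjn, i, hij, ?_⟩
  simp [thX, heq]

-- periodicity from one repeat x_μ = x_K
theorem th_per (l : List Int) (hPre : Pre_turtoise_and_hare l) {μ K : Nat} (hμK : μ < K) (hxK : thX l μ = thX l K) :
    ∀ k, μ ≤ k → thX l (k + (K - μ)) = thX l k := by
  intro k hk
  induction k, hk using Nat.le_induction with
  | base =>
    have : μ + (K - μ) = K := by omega
    rw [this, ← hxK]
  | succ k hk ih =>
    have h1 : k + 1 + (K - μ) = (k + (K - μ)) + 1 := by omega
    have h2 := thX_step l hPre (k + (K - μ))
    have h3 := thX_step l hPre k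
    rw [ih] at h2
    rw [h3] at h2
    rw [h1]
    exact (Option.some_injective _ h2).symm

theorem th_per_mult (l : List Int) (hPre : Pre_turtoise_and_hare l) {μ K : Nat} (hμK : μ < K) (hxK : thX l μ = thX l K) :
    ∀ t k, μ ≤ k → thX l (k + t * (K - μ)) = thX l k := by
  intro t
  induction t with
  | zero => simp
  | succ t ih =>
    intro k hk
    have : k + (t + 1) * (K - μ) = (k + t * (K - μ)) + (K - μ) := by ring
    rw [this, th_per l hPre hμK hxK _ (by omega), ih k hk]

-- any index ≥ μ reduces into the cycle window [μ, K)
theorem th_reduce (l : List Int) (hPre : Pre_turtoise_and_hare l) {μ K : Nat} (hμK : μ < K) (hxK : thX l μ = thX l K)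
    {k : Nat} (hk : μ ≤ k) :
    thX l k = thX l (μ + (k - μ) % (K - μ)) ∧ μ + (k - μ) % (K - μ) < K := by
  have hlam : 0 < K - μ := by omega
  have hmod : (k - μ) % (K - μ) < K - μ := Nat.mod_lt _ hlam
  have hdm : (K - μ) * ((k - μ) / (K - μ)) + (k - μ) % (K - μ) = k - μ := Nat.div_add_mod _ _
  have hk' : k = (μ + (k - μ) % (K - μ)) + ((k - μ) / (K - μ)) * (K - μ) := by
    have hcomm : ((k - μ) / (K - μ)) * (K - μ) = (K - μ) * ((k - μ) / (K - μ)) := Nat.mul_comm _ _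
    omega
  constructor
  · conv_lhs => rw [hk']
    rw [th_per_mult l hPre hμK hxK _ _ (by omega)]
  · omega

-- the key characterisation: a repeat x_i = x_j (i < j) forces i ≥ μ and (K-μ) ∣ (j-i)
theorem th_forward (l : List Int) (hPre : Pre_turtoise_and_hare l) {μ K : Nat} (hμK : μ < K) (hxK : thX l μ = thX l K)
    (hmin : ∀ j < K, ∀ i < j, thX l i ≠ thX l j) :
    ∀ i j, i < j → thX l i = thX l j → μ ≤ i ∧ (K - μ) ∣ (j - i) := by
  intro i j hij heq
  by_cases hjK : j < K
  · exact absurd heq (hmin j hjK i hij)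
  · replace hjK : K ≤ j := by omega
    have hjμ : μ ≤ j := by omega
    obtain ⟨hjred, hjlt⟩ := th_reduce l hPre hμK hxK hjμ
    set r := (j - μ) % (K - μ) with hr
    by_cases hiμ : μ ≤ i
    · obtain ⟨hired, hilt⟩ := th_reduce l hPre hμK hxK hiμ
      set r' := (i - μ) % (K - μ) with hr'
      have heq' : thX l (μ + r') = thX l (μ + r) := by rw [← hired, ← hjred, heq]
      have hrr : r' = r := by
        by_contra hne
        rcases Nat.lt_or_ge (μ + r') (μ + r) with h | h
        · exact hmin _ hjlt _ h heq'
        · have : μ + r < μ + r' := by omega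
          exact hmin _ hilt _ this heq'.symm
      refine ⟨hiμ, ?_⟩
      have hmodeq : (i - μ) % (K - μ) = (j - μ) % (K - μ) := by rw [← hr', ← hr, hrr]
      have : (K - μ) ∣ (j - μ) - (i - μ) := (Nat.modEq_iff_dvd' (by omega)).mp hmodeq
      have hsub : (j - μ) - (i - μ) = j - i := by omega
      rwa [hsub] at this
    · replace hiμ : i < μ := by omega
      have heq' : thX l i = thX l (μ + r) := by rw [heq, hjred]
      have hlt : i < μ + r := by omega
      exact absurd heq' (hmin _ hjlt _ hlt)

-- Phase 1 of A returns x_m, m the least i ≥ 1 with x_i = x_{2i}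
theorem thPhase1_run (l : List Int) (hPre : Pre_turtoise_and_hare l) {m : Nat}
    (hm1 : 1 ≤ m) (hmeet : thX l m = thX l (2 * m))
    (hmmin : ∀ i, 1 ≤ i → i < m → thX l i ≠ thX l (2 * i)) :
    ∀ fuel i, i < m → m - i ≤ fuel →
      thPhase1 l fuel (thX l i) (thX l (2 * i)) = some (thX l m) := by
  intro fuel
  induction fuel with
  | zero => intro i h1 h2; omega
  | succ fuel ih =>
    intro i h1 _
    show thPhase1 l (fuel + 1) (thX l i) (thX l (2 * i)) = some (thX l m)
    have h2i1 : 2 * i + 1 + 1 = 2 * (i + 1) := by ring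
    simp only [thPhase1, thX_step l hPre i, thX_step l hPre (2 * i),
      thX_step l hPre (2 * i + 1), h2i1]
    by_cases heq : thX l (i + 1) = thX l (2 * (i + 1))
    · rw [if_pos heq]
      have : i + 1 = m := by
        by_contra hne
        exact hmmin (i + 1) (by omega) (by omega) heq
      rw [this]
    · rw [if_neg heq]
      have hne : i + 1 ≠ m := by
        intro h; subst h
        exact heq hmeet
      exact ih (i + 1) (by omega) (by omega)

-- Phase 2 of A returns x_μ
theorem thPhase2_run (l : List Int) (hPre : Pre_turtoise_and_hare l) {μ K m : Nat}
    (hμK : μ < K) (hxK : thX l μ = thX l K)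
    (hmin : ∀ j < K, ∀ i < j, thX l i ≠ thX l j)
    (hm1 : 1 ≤ m) (hdvd : (K - μ) ∣ m) :
    ∀ fuel j, j ≤ μ → μ - j < fuel →
      thPhase2 l fuel (thX l j) (thX l (m + j)) = some (thX l μ) := by
  intro fuel
  induction fuel with
  | zero => intro j h1 h2; omega
  | succ fuel ih =>
    intro j h1 _
    show thPhase2 l (fuel + 1) (thX l j) (thX l (m + j)) = some (thX l μ)
    by_cases hj : j = μ
    · subst hj
      have heq : thX l (m + j) = thX l j := by
        obtain ⟨t, ht⟩ := hdvd
        have hm' : m + j = j + t * (K - j) := by rw [ht]; ring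
        rw [hm', th_per_mult l hPre hμK hxK t j (le_refl j)]
      rw [thPhase2, if_pos heq.symm]
    · have hjμ : j < μ := by omega
      have hne : thX l j ≠ thX l (m + j) := by
        intro heq
        have := th_forward l hPre hμK hxK hmin j (m + j) (by omega) heq
        omega
      simp only [thPhase2, if_neg hne, thX_step l hPre j, thX_step l hPre (m + j)]
      have hmj : m + j + 1 = m + (j + 1) := by omega
      rw [hmj]
      exact ih (j + 1) (by omega) (by omega)

-- B's walk returns x_K, the first repeated value
theorem thWalk_run (l : List Int) (hPre : Pre_turtoise_and_hare l) {μ K : Nat}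
    (hμK : μ < K) (hxK : thX l μ = thX l K)
    (hmin : ∀ j < K, ∀ i < j, thX l i ≠ thX l j) :
    ∀ fuel k, k ≤ K → K - k < fuel →
      thWalk l fuel (PySem.Set.ofList ((List.range k).map (thX l))) (thX l k) = some (thX l K) := by
  intro fuel
  induction fuel with
  | zero => intro k h1 h2; omega
  | succ fuel ih =>
    intro k h1 _
    show thWalk l (fuel + 1) _ _ = some (thX l K)
    by_cases hk : k = K
    · subst hk
      have hmem : thX l k ∈ PySem.Set.ofList ((List.range k).map (thX l)) := by
        rw [PySem.Set.mem_ofList]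
        exact List.mem_map.mpr ⟨μ, List.mem_range.mpr hμK, hxK⟩
      rw [thWalk, if_pos ((PySem.Set.contains_iff _ _).mpr hmem)]
    · have hkK : k < K := by omega
      have hnmem : thX l k ∉ PySem.Set.ofList ((List.range k).map (thX l)) := by
        rw [PySem.Set.mem_ofList]
        intro hmem
        obtain ⟨i, hi, heq⟩ := List.mem_map.mp hmem
        exact hmin k hkK i (List.mem_range.mp hi) heq
      have hcontains : PySem.Set.contains (PySem.Set.ofList ((List.range k).map (thX l))) (thX l k) = false := by
        rw [← Bool.not_eq_true, PySem.Set.contains_iff]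
        exact hnmem
      simp only [thWalk, hcontains, Bool.false_eq_true, if_false, thX_step l hPre k]
      have hset : PySem.Set.add (PySem.Set.ofList ((List.range k).map (thX l))) (thX l k)
          = PySem.Set.ofList ((List.range (k + 1)).map (thX l)) := by
        rw [List.range_succ, List.map_append, List.map_singleton, PySem.Set.ofList_append_singleton]
      rw [hset]
      exact ih (k + 1) (by omega) (by omega)

-- ===== VERDICT (by name: the statement is the Claim_ definition above) =====
theorem turtoise_and_hare_spec : Claim_equal_turtoise_and_hare := by
  intro l _ hPre
  unfold Spec_turtoise_and_hare
  -- the first repeat: K least with x_K ∈ {x_0, …, x_{K-1}}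
  obtain ⟨j0, hj0n, i0, hi0, heq0⟩ := th_pigeonhole l hPre
  have hex : ∃ k, ∃ i, i < k ∧ thX l i = thX l k := ⟨j0, i0, hi0, heq0⟩
  set K := Nat.find hex with hKdef
  obtain ⟨μ, hμK, hxK⟩ := Nat.find_spec hex
  have hKn : K ≤ l.length := le_trans (Nat.find_le ⟨i0, hi0, heq0⟩) hj0n
  have hmin : ∀ j < K, ∀ i < j, thX l i ≠ thX l j := by
    intro j hj i hij heq
    exact Nat.find_min hex hj ⟨i, hij, heq⟩
  -- the meeting index m of phase 1: witness i* = (K-μ)·(μ/(K-μ)+1), a multiple of the period ≥ μ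
  have hlam : 0 < K - μ := by omega
  have hdm2 := Nat.div_add_mod μ (K - μ)
  have hmod2 := Nat.mod_lt μ hlam
  have hexp : (K - μ) * (μ / (K - μ) + 1) = (K - μ) * (μ / (K - μ)) + (K - μ) := by ring
  have hge : μ < (K - μ) * (μ / (K - μ) + 1) := by omega
  have hle : (K - μ) * (μ / (K - μ) + 1) ≤ K := by omega
  have hstar : thX l ((K - μ) * (μ / (K - μ) + 1)) = thX l (2 * ((K - μ) * (μ / (K - μ) + 1))) := by
    have h2 : 2 * ((K - μ) * (μ / (K - μ) + 1))
        = (K - μ) * (μ / (K - μ) + 1) + (μ / (K - μ) + 1) * (K - μ) := by ring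
    rw [h2, th_per_mult l hPre hμK hxK _ _ (by omega)]
  have hm_ex : ∃ i, 1 ≤ i ∧ thX l i = thX l (2 * i) := ⟨_, by omega, hstar⟩
  set m := Nat.find hm_ex with hmdef
  obtain ⟨hm1, hmeet⟩ := Nat.find_spec hm_ex
  have hmmin : ∀ i, 1 ≤ i → i < m → thX l i ≠ thX l (2 * i) := by
    intro i h1 hi heq
    exact Nat.find_min hm_ex hi ⟨h1, heq⟩
  have hmK : m ≤ K :=
    le_trans (Nat.find_le ⟨by omega, hstar⟩) hle
  obtain ⟨hμm, hdvd⟩ := th_forward l hPre hμK hxK hmin m (2 * m) (by omega) hmeet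
  have hdvd' : (K - μ) ∣ m := by
    have : 2 * m - m = m := by omega
    rwa [this] at hdvd
  -- evaluate port A
  have h0 : PySem.List.pyGet? l 0 = some (thX l 0) := thOb_eq_some l hPre 0
  have hA : turtoise_and_hare l = thX l μ := by
    have hp1 : thPhase1 l (l.length + 1) (thX l 0) (thX l 0) = some (thX l m) := by
      have := thPhase1_run l hPre hm1 hmeet hmmin (l.length + 1) 0 (by omega) (by omega)
      simpa using this
    have hp2 : thPhase2 l (l.length + 1) (thX l 0) (thX l m) = some (thX l μ) := by
      have := thPhase2_run l hPre hμK hxK hmin hm1 hdvd' (l.length + 1) 0 (by omega) (by omega)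
      simpa using this
    simp only [turtoise_and_hare, h0, hp1, hp2]
  -- evaluate port B
  have hB : turtoise_and_hare_alt l = thX l K := by
    have hw : thWalk l (l.length + 1) PySem.Set.empty (thX l 0) = some (thX l K) := by
      have := thWalk_run l hPre hμK hxK hmin (l.length + 1) 0 (by omega) (by omega)
      simpa [PySem.Set.ofList] using this
    simp only [turtoise_and_hare_alt, h0, hw]
  rw [hA, hB, hxK]
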